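-- pv_equiv track=rewrite | github.com/amogh-aziro-18/homenet-smart-residential | agents/routing_agent.py | assign_technician
-- ===== SOURCE A (Python) =====
-- from typing import List, Dict, Optional
--
-- TECHNICIANS = {
--     "TECH_001": {
--         "name": "Technician A",
--         "skills": ["pumps", "electrical", "plumbing"],
--         "available": True,
--         "current_load": 2,
--         "max_capacity": 5,
--     },
--     "TECH_002": {
--         "name": "Technician B",
--         "skills": ["pumps", "mechanical", "sensors"],
--         "available": True,
--         "current_load": 1,
--         "max_capacity": 5,
--     },
--     "TECH_003": {
--         "name": "Technician C",
--         "skills": ["plumbing", "general"],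
--         "available": False,
--         "current_load": 5,
--         "max_capacity": 5,
--     },
--     "TECH_004": {
--         "name": "Technician D",
--         "skills": ["electrical", "sensors", "diagnostics"],
--         "available": True,
--         "current_load": 0,
--         "max_capacity": 5,
--     },
-- }
--
-- def assign_technician(task: Dict, required_skills: List[str]) -> Optional[str]:
--     """Find best available technician for a task."""
--     candidates = []
--
--     # Priority 1: available + skill match, lowest load wins
--     for tech_id, tech in TECHNICIANS.items():
--         if not tech["available"]:
--             continue
--         if any(skill in tech["skills"] for skill in required_skills):
--             candidates.append((tech_id, tech["current_load"]))
--
--     candidates.sort(key=lambda x: x[1])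
--     if candidates:
--         return candidates[0][0]
--
--     # Priority 2: any available tech
--     for tech_id, tech in TECHNICIANS.items():
--         if tech["available"]:
--             return tech_id
--
--     return None
-- ===== SOURCE B (Python) =====
-- from typing import List, Dict, Optional
--
-- TECHNICIANS = {
--     "TECH_001": {
--         "name": "Technician A",
--         "skills": ["pumps", "electrical", "plumbing"],
--         "available": True,
--         "current_load": 2,
--         "max_capacity": 5,
--     },
--     "TECH_002": {
--         "name": "Technician B",
--         "skills": ["pumps", "mechanical", "sensors"],
--         "available": True,
--         "current_load": 1,
--         "max_capacity": 5,
--     },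
--     "TECH_003": {
--         "name": "Technician C",
--         "skills": ["plumbing", "general"],
--         "available": False,
--         "current_load": 5,
--         "max_capacity": 5,
--     },
--     "TECH_004": {
--         "name": "Technician D",
--         "skills": ["electrical", "sensors", "diagnostics"],
--         "available": True,
--         "current_load": 0,
--         "max_capacity": 5,
--     },
-- }
--
-- def assign_technician(task: Dict, required_skills: List[str]) -> Optional[str]:
--     """Single pass: running minimum over skilled available techs, plus first-available fallback."""
--     best_id = None
--     best_load = None
--     fallback_id = None
--     for tech_id, tech in TECHNICIANS.items():
--         if not tech["available"]:
--             continue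
--         if fallback_id is None:
--             fallback_id = tech_id
--         if any(skill in tech["skills"] for skill in required_skills):
--             if best_load is None or tech["current_load"] < best_load:
--                 best_id, best_load = tech_id, tech["current_load"]
--     return best_id if best_id is not None else fallback_id
-- ===== Notes on version B (the rewrite author's own statement) =====
-- stated objective: simpler
-- what changed: Replaces A's candidate-list build + stable sort + second fallback loop with one pass over TECHNICIANS keeping a strict-'<' running minimum and a first-available fallback.
import Mathlib
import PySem

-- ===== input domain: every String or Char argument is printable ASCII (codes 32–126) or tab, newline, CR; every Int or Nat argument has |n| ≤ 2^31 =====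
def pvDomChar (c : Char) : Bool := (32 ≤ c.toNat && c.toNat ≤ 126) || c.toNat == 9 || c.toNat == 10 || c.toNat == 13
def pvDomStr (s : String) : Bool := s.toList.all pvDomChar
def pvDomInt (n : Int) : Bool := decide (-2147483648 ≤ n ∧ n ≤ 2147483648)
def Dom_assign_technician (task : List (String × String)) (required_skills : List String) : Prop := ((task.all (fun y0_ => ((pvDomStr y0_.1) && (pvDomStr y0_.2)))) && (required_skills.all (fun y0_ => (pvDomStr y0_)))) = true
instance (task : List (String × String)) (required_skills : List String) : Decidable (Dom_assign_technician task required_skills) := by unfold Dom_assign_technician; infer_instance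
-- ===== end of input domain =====

-- B replaces A's candidate list + stable sort + second fallback loop by one pass keeping a
-- running minimum (strict '<', so the first tech wins ties) and a first-available fallback;
-- same return value, simpler structure ('task' is unused by both, as in the Python).

-- shared module-level constant TECHNICIANS: (id, (skills, available, current_load))
def pvTechnicians : List (String × List String × Bool × Int) :=
  [ ("TECH_001", (["pumps", "electrical", "plumbing"], true, 2)),
    ("TECH_002", (["pumps", "mechanical", "sensors"], true, 1)),
    ("TECH_003", (["plumbing", "general"], false, 5)),
    ("TECH_004", (["electrical", "sensors", "diagnostics"], true, 0)) ]

-- any(skill in skills for skill in required_skills)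
def pvSkillMatch (required_skills : List String) (skills : List String) : Bool :=
  required_skills.any (fun skill => skills.contains skill)

-- ===== PORT A =====
-- Priority 2 loop of A: first available technician, in dict order
def pvFirstAvailable : List (String × List String × Bool × Int) → Option String
  | [] => none
  | t :: rest => if t.2.2.1 then some t.1 else pvFirstAvailable rest

def assign_technician (task : List (String × String)) (required_skills : List String) : Option String :=
  -- Priority 1 loop: collect (tech_id, current_load) for available techs with a skill match
  let candidates : List (String × Int) :=
    pvTechnicians.foldl
      (fun acc t =>
        if !t.2.2.1 then acc
        else if pvSkillMatch required_skills t.2.1 then acc ++ [(t.1, t.2.2.2)] else acc)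
      []
  -- candidates.sort(key=lambda x: x[1]) (stable), then candidates[0][0]
  match PySem.List.sorted candidates (fun x => x.2) false with
  | (tech_id, _) :: _ => some tech_id
  | [] => pvFirstAvailable pvTechnicians

-- ===== PORT B =====
def assign_technician_alt (task : List (String × String)) (required_skills : List String) : Option String :=
  let st :=
    pvTechnicians.foldl
      (fun (st : Option (String × Int) × Option String) t =>
        if !t.2.2.1 then st
        else
          let fallback := match st.2 with
            | none => some t.1
            | some f => some f
          let best := if pvSkillMatch required_skills t.2.1 then
              match st.1 with
              | none => some (t.1, t.2.2.2)
              | some (bid, bl) => if t.2.2.2 < bl then some (t.1, t.2.2.2) else some (bid, bl)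
            else st.1
          (best, fallback))
      (none, none)
  match st.1 with
  | some (bid, _) => some bid
  | none => st.2

-- ===== PRECONDITION & SPEC =====
def Spec_assign_technician (task : List (String × String)) (required_skills : List String) (out : Option String) : Prop := out = assign_technician_alt task required_skills
instance (task : List (String × String)) (required_skills : List String) (out : Option String) : Decidable (Spec_assign_technician task required_skills out) := by unfold Spec_assign_technician; infer_instance

-- ===== CLAIM (what is proved, stated in full; the proofs are below) =====
def Claim_equal_assign_technician : Prop := ∀ (task : List (String × String)) (required_skills : List String), Dom_assign_technician task required_skills → Spec_assign_technician task required_skills (assign_technician task required_skills)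

-- ===== LEMMAS AND PROOFS =====
-- Both results depend on required_skills only through the three skill-match booleans of the
-- available technicians; case on them and evaluate both closed programs.

-- ===== VERDICT (by name: the statement is the Claim_ definition above) =====
theorem assign_technician_spec : Claim_equal_assign_technician := by
  intro task required_skills _
  unfold Spec_assign_technician
  cases h1 : pvSkillMatch required_skills ["pumps", "electrical", "plumbing"] <;>
  cases h2 : pvSkillMatch required_skills ["pumps", "mechanical", "sensors"] <;>
  cases h4 : pvSkillMatch required_skills ["electrical", "sensors", "diagnostics"] <;>
    simp [assign_technician, assign_technician_alt, pvTechnicians, pvFirstAvailable,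
      List.foldl, h1, h2, h4] <;> decide
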